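-- pv_equiv track=rewrite | github.com/chriswardell-glean/advent-of-code | 2023/day2.py | get_power_of_game
-- ===== SOURCE A (Python) =====
-- def get_power_of_game(bag_contents, hands) -> int:
--     minimums = {}
--
--     for hand in hands:
--         for colour, number in hand.items():
--             # no current minimum set, this is the new minimum
--             if colour not in minimums:
--                 minimums[colour] = number
--             # number is higher than minimum - new minimum required
--             elif minimums[colour] < number:
--                 minimums[colour] = number
--
--
--     power = 1
--     for _, minimum in minimums.items():
--         power *= minimum
--
--     return power
-- ===== SOURCE B (Python) =====
-- def get_power_of_game(bag_contents, hands) -> int: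
--     # Phase 1: all colours that appear in any hand, in first-appearance order.
--     colours = []
--     for hand in hands:
--         for colour in hand:
--             if colour not in colours:
--                 colours.append(colour)
--     # Phase 2: per colour, rescan the hands for its maximum count; multiply.
--     power = 1
--     for colour in colours:
--         power *= max(hand[colour] for hand in hands if colour in hand)
--     return power
-- ===== Notes on version B (the rewrite author's own statement) =====
-- stated objective: alternative
-- what changed: Instead of A's single accumulating pass maintaining a running-max dict, B first collects the distinct colours across all hands and then, per colour, rescans the hands to take the max of its counts, multiplying the maxima.
import Mathlib
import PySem

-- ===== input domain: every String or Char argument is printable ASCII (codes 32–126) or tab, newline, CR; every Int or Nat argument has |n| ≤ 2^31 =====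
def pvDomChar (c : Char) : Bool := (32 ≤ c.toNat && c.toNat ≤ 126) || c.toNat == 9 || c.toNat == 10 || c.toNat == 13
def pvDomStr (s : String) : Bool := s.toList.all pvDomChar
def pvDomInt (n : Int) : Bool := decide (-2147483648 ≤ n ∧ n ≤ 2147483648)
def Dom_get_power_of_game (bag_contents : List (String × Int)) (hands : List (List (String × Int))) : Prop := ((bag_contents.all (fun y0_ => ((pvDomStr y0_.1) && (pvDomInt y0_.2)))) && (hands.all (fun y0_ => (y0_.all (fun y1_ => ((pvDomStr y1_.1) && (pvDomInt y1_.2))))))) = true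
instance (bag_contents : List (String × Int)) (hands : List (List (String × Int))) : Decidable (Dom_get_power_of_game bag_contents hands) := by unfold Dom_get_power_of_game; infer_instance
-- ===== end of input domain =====

-- B replaces A's single accumulating running-max pass by a two-phase traversal (collect the
-- distinct colours, then per colour rescan the hands for its maximum count); 'alternative'.
-- Each Python `hand` dict is modelled as PySem.Dict.ofList of its association list.

-- ===== PORT A =====
-- body of A's inner loop: `if colour not in minimums: minimums[colour] = number;
-- elif minimums[colour] < number: minimums[colour] = number`
-- (`colour not in minimums` is ported as `get? = none`, the same test on a dict)
def pvMergeStep (m : PySem.Dict String Int) (cn : String × Int) : PySem.Dict String Int :=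
  match m.get? cn.1 with
  | none => m.insert cn.1 cn.2
  | some v => if v < cn.2 then m.insert cn.1 cn.2 else m

def get_power_of_game (bag_contents : List (String × Int)) (hands : List (List (String × Int))) : Int :=
  let minimums : PySem.Dict String Int :=
    hands.foldl (fun m hand => (PySem.Dict.ofList hand).items.foldl pvMergeStep m) PySem.Dict.empty
  -- `power = 1; for _, minimum in minimums.items(): power *= minimum`
  minimums.items.foldl (fun power kv => power * kv.2) 1

-- ===== PORT B =====
def get_power_of_game_alt (bag_contents : List (String × Int)) (hands : List (List (String × Int))) : Int :=
  -- phase 1: `for hand in hands: for colour in hand: if colour not in colours: colours.append(colour)`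
  let colours : List String :=
    hands.foldl (fun s hand => (PySem.Dict.ofList hand).keys.foldl (fun s c => PySem.Set.add s c) s) []
  -- phase 2: `power *= max(hand[colour] for hand in hands if colour in hand)`
  colours.foldl (fun power c =>
    match PySem.List.max? (hands.filterMap (fun hand => (PySem.Dict.ofList hand).get? c)) (fun y => y) with
    | none => power          -- unreachable: every colour in `colours` occurs in some hand (Python max never sees an empty generator)
    | some v => power * v) 1

-- ===== PRECONDITION & SPEC =====
def Spec_get_power_of_game (bag_contents : List (String × Int)) (hands : List (List (String × Int))) (out : Int) : Prop := out = get_power_of_game_alt bag_contents hands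
instance (bag_contents : List (String × Int)) (hands : List (List (String × Int))) (out : Int) : Decidable (Spec_get_power_of_game bag_contents hands out) := by unfold Spec_get_power_of_game; infer_instance

-- ===== CLAIM (what is proved, stated in full; the proofs are below) =====
def Claim_equal_get_power_of_game : Prop := ∀ (bag_contents : List (String × Int)) (hands : List (List (String × Int))), Dom_get_power_of_game bag_contents hands → Spec_get_power_of_game bag_contents hands (get_power_of_game bag_contents hands)

-- ===== LEMMAS AND PROOFS =====

-- running maximum as an Option accumulator
def pvOmax (o : Option Int) (v : Int) : Option Int :=
  some (match o with | none => v | some w => max w v)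

theorem mergeStep_get? (m : PySem.Dict String Int) (cn : String × Int) (c : String) :
    (pvMergeStep m cn).get? c = if cn.1 = c then pvOmax (m.get? c) cn.2 else m.get? c := by
  unfold pvMergeStep
  rcases eq_or_ne cn.1 c with rfl | hne
  · simp only [if_pos rfl]
    rcases h : m.get? cn.1 with _ | v
    · simp [h, PySem.Dict.get?_insert, pvOmax]
    · simp only [h]
      split_ifs with hlt
      · simp [PySem.Dict.get?_insert, pvOmax, h, max_eq_right (le_of_lt hlt)]
      · simp [pvOmax, h, max_eq_left (not_lt.mp hlt)]
  · simp only [if_neg hne]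
    rcases h : m.get? cn.1 with _ | v
    · simp [PySem.Dict.get?_insert, (Ne.symm hne)]
    · simp only []
      split_ifs with hlt
      · simp [PySem.Dict.get?_insert, (Ne.symm hne)]
      · rfl

theorem foldl_merge_get? (l : List (String × Int)) (m : PySem.Dict String Int) (c : String) :
    (l.foldl pvMergeStep m).get? c
      = ((l.filter (fun p => p.1 = c)).map (·.2)).foldl pvOmax (m.get? c) := by
  induction l generalizing m with
  | nil => rfl
  | cons p t ih =>
    simp only [List.foldl_cons, List.filter_cons]
    rcases eq_or_ne p.1 c with h | h
    · rw [ih, mergeStep_get? m p c, if_pos h]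
      simp [h]
    · simp only [h, decide_false, if_neg h]
      rw [ih, mergeStep_get? m p c, if_neg h]
      simp [h]

theorem filter_items_mk (l : List (String × Int)) (h : (l.map Prod.fst).Nodup) (c : String) :
    (((PySem.Dict.mk l).items).filter (fun p => p.1 = c)).map (·.2) = ((PySem.Dict.mk l).get? c).toList := by
  induction l with
  | nil => simp [PySem.Dict.items, PySem.Dict.get?]
  | cons p t ih =>
    simp only [List.map_cons, List.nodup_cons] at h
    simp only [PySem.Dict.items] at *
    rw [PySem.Dict.get?_mk_cons]
    rcases eq_or_ne p.1 c with rfl | hne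
    · simp only [List.filter_cons, decide_true, if_pos rfl]
      have : (t.filter (fun q => q.1 = p.1)) = [] := by
        apply List.filter_eq_nil_iff.mpr
        intro q hq hqc
        simp only [decide_eq_true_eq] at hqc
        exact h.1 (by simpa using ⟨q.2, by simpa [← hqc] using hq⟩)
      simp [this]
    · rw [List.filter_cons_of_neg (by simpa using hne), ih h.2]
      simp [hne]

theorem filter_items_eq (d : PySem.Dict String Int) (h : d.keys.Nodup) (c : String) :
    (d.items.filter (fun p => p.1 = c)).map (·.2) = (d.get? c).toList := by
  obtain ⟨l⟩ := d
  exact filter_items_mk l (by simpa [PySem.Dict.keys] using h) c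

theorem hands_fold_get? (hands : List (List (String × Int))) (m : PySem.Dict String Int) (c : String) :
    ((hands.foldl (fun m hand => (PySem.Dict.ofList hand).items.foldl pvMergeStep m) m).get? c)
      = (hands.filterMap (fun hand => (PySem.Dict.ofList hand).get? c)).foldl pvOmax (m.get? c) := by
  induction hands generalizing m with
  | nil => rfl
  | cons hand t ih =>
    simp only [List.foldl_cons, List.filterMap_cons]
    rw [ih, foldl_merge_get?, filter_items_eq _ (PySem.Dict.nodup_keys_ofList hand) c]
    rcases hg : (PySem.Dict.ofList hand).get? c with _ | v
    · simp
    · simp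

theorem mergeStep_keys (m : PySem.Dict String Int) (cn : String × Int) :
    (pvMergeStep m cn).keys = PySem.Set.add m.keys cn.1 := by
  unfold pvMergeStep
  rcases h : m.get? cn.1 with _ | v
  · have hc : m.contains cn.1 = false := by rw [PySem.Dict.contains_eq_isSome_get?, h]; rfl
    have hnm : cn.1 ∉ m.keys := (PySem.Dict.get?_eq_none_iff_not_mem_keys m cn.1).mp h
    rw [PySem.Dict.keys_insert_of_not_contains m cn.2 hc, PySem.Set.add_of_not_mem hnm]
  · have hc : m.contains cn.1 = true := by rw [PySem.Dict.contains_eq_isSome_get?, h]; rfl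
    have hmem : cn.1 ∈ m.keys := (PySem.Dict.contains_iff_mem_keys m cn.1).mp hc
    simp only []
    split_ifs
    · rw [PySem.Dict.keys_insert_of_contains m cn.2 hc, PySem.Set.add_of_mem hmem]
    · rw [PySem.Set.add_of_mem hmem]

theorem hands_fold_keys (hands : List (List (String × Int))) (m : PySem.Dict String Int) :
    (hands.foldl (fun m hand => (PySem.Dict.ofList hand).items.foldl pvMergeStep m) m).keys
      = hands.foldl (fun s hand => (PySem.Dict.ofList hand).keys.foldl (fun s c => PySem.Set.add s c) s) m.keys := by
  have inner : ∀ (l : List (String × Int)) (m : PySem.Dict String Int),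
      (l.foldl pvMergeStep m).keys = l.foldl (fun s p => PySem.Set.add s p.1) m.keys := by
    intro l
    induction l with
    | nil => intro m; rfl
    | cons p t ih => intro m; simp only [List.foldl_cons]; rw [ih, mergeStep_keys]
  induction hands generalizing m with
  | nil => rfl
  | cons hand t ih =>
    simp only [List.foldl_cons]
    rw [ih, inner]
    congr 1
    rw [show (PySem.Dict.ofList hand).keys = (PySem.Dict.ofList hand).items.map (fun p => p.1) from rfl,
        List.foldl_map]

theorem foldl_omax_some (t : List Int) (a : Int) :
    t.foldl pvOmax (some a) = some (t.foldl max a) := by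
  induction t generalizing a with
  | nil => rfl
  | cons x s ih => simpa [pvOmax] using ih (max a x)

theorem foldl_omax_eq_max? (l : List Int) :
    l.foldl pvOmax none = PySem.List.max? l (fun y => y) := by
  cases l with
  | nil => rfl
  | cons x t =>
    rw [PySem.List.max?_id_cons]
    simpa [pvOmax] using foldl_omax_some t x

theorem nodup_foldl_add (l : List String) (s : PySem.Set String) (h : s.Nodup) :
    (l.foldl (fun s c => PySem.Set.add s c) s).Nodup := by
  induction l generalizing s with
  | nil => exact h
  | cons x t ih => exact ih _ (PySem.Set.nodup_add s x h)

theorem nodup_colours (hands : List (List (String × Int))) (s : PySem.Set String) (h : s.Nodup) :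
    (hands.foldl (fun s hand => (PySem.Dict.ofList hand).keys.foldl (fun s c => PySem.Set.add s c) s) s).Nodup := by
  induction hands generalizing s with
  | nil => exact h
  | cons hand t ih => exact ih _ (nodup_foldl_add _ _ h)

theorem main_eq (bag : List (String × Int)) (hands : List (List (String × Int))) :
    get_power_of_game bag hands = get_power_of_game_alt bag hands := by
  unfold get_power_of_game get_power_of_game_alt
  simp only []
  set M := hands.foldl (fun m hand => (PySem.Dict.ofList hand).items.foldl pvMergeStep m) PySem.Dict.empty with hM
  have hkeys : M.keys = hands.foldl (fun s hand => (PySem.Dict.ofList hand).keys.foldl (fun s c => PySem.Set.add s c) s) [] := by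
    rw [hM, hands_fold_keys]
    rfl
  have hnd : M.keys.Nodup := by rw [hkeys]; exact nodup_colours hands [] (by simp)
  rw [PySem.Dict.items_eq_map_keys M hnd 0, List.foldl_map, hkeys.symm]
  apply PySem.List.foldl_congr_mem
  intro acc k hk
  have hget : M.get? k = PySem.List.max? (hands.filterMap (fun hand => (PySem.Dict.ofList hand).get? k)) (fun y => y) := by
    rw [hM, hands_fold_get?, ← foldl_omax_eq_max?]
    rfl
  rcases hv : M.get? k with _ | v
  · exact absurd hk ((PySem.Dict.get?_eq_none_iff_not_mem_keys M k).mp hv)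
  · rw [← hget, hv]
    simp only []
    rw [PySem.Dict.getD_of_get?_eq_some M 0 hv]

-- ===== VERDICT (by name: the statement is the Claim_ definition above) =====
theorem get_power_of_game_spec : Claim_equal_get_power_of_game := by
  intro bag_contents hands _
  exact main_eq bag_contents hands
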